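-- pv_equiv track=rewrite | github.com/58191554/MyLeetCode | src/max_triplet_python/max_triplet_python.py | maxTriplets
-- ===== SOURCE A (Python) =====
-- from typing import List
--
-- def maxTriplets(nums: List[int]) -> int:
--     n = len(nums)
--     if n < 3:
--         return 0
--     cache = [0] * (n + 1)
--     for i in range(n - 3, -1, -1):
--         if nums[i] + nums[i + 1] + nums[i + 2] == 0:
--             cache[i] = max([1 + cache[i + 3], cache[i + 1], cache[i + 2]])
--         else:
--             cache[i] = max([cache[i + 1], cache[i + 2], cache[i + 3]])
--     return max(cache[0], cache[1], cache[2])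
-- ===== SOURCE B (Python) =====
-- from typing import List
--
-- def maxTriplets(nums: List[int]) -> int:
--     # Greedy single pass: always take the leftmost zero-sum consecutive triplet.
--     n = len(nums)
--     count = 0
--     i = 0
--     while i + 3 <= n:
--         if nums[i] + nums[i + 1] + nums[i + 2] == 0:
--             count += 1
--             i += 3
--         else:
--             i += 1
--     return count
-- ===== Notes on version B (the rewrite author's own statement) =====
-- stated objective: simpler
-- what changed: Replaced the backward DP over an (n+1)-entry cache array with a forward greedy single pass that commits to the leftmost zero-sum triplet (count and index only, no table); an exchange argument shows the greedy count equals the DP optimum.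
import Mathlib
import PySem

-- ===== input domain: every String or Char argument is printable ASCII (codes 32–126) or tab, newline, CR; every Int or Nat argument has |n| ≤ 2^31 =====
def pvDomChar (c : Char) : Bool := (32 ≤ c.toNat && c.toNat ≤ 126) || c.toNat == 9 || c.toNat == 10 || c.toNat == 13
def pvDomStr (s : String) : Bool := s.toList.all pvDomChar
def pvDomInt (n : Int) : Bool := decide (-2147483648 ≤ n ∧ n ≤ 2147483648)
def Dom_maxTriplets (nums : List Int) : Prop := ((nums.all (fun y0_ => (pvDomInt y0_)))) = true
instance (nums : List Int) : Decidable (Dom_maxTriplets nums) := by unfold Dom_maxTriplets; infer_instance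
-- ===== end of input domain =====

-- B replaces A's backward DP table with a forward greedy pass taking the leftmost zero-sum triplet (no cache array).

-- ===== PORT A =====
-- one iteration of A's loop body: cache[i] = max([...]) (Python max([x,y,z]) = max(max(x,y),z))
def stepA (nums : List Int) (cache : List Int) (i : Int) : List Int :=
  if PySem.List.pyGetD nums i 0 + PySem.List.pyGetD nums (i+1) 0 + PySem.List.pyGetD nums (i+2) 0 = 0 then
    PySem.List.pySetD cache i
      (max (max (1 + PySem.List.pyGetD cache (i+3) 0) (PySem.List.pyGetD cache (i+1) 0)) (PySem.List.pyGetD cache (i+2) 0))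
  else
    PySem.List.pySetD cache i
      (max (max (PySem.List.pyGetD cache (i+1) 0) (PySem.List.pyGetD cache (i+2) 0)) (PySem.List.pyGetD cache (i+3) 0))

def maxTriplets (nums : List Int) : Int :=
  let n : Int := nums.length
  if n < 3 then 0
  else
    let cache := (PySem.List.pyRange (n-3) (-1) (-1)).foldl (stepA nums) (List.replicate (n+1).toNat 0)
    max (max (PySem.List.pyGetD cache 0 0) (PySem.List.pyGetD cache 1 0)) (PySem.List.pyGetD cache 2 0)

-- ===== PORT B =====
-- B's while loop: i and count as the loop state (indices stay nonnegative, so Nat i is exact)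
def gAux (nums : List Int) (i : Nat) (count : Int) : Int :=
  if i + 3 ≤ nums.length then
    if nums.getD i 0 + nums.getD (i+1) 0 + nums.getD (i+2) 0 = 0 then
      gAux nums (i+3) (count+1)
    else
      gAux nums (i+1) count
  else count
termination_by nums.length - i

def maxTriplets_alt (nums : List Int) : Int := gAux nums 0 0

-- ===== PRECONDITION & SPEC =====
def Spec_maxTriplets (nums : List Int) (out : Int) : Prop := out = maxTriplets_alt nums
instance (nums : List Int) (out : Int) : Decidable (Spec_maxTriplets nums out) := by unfold Spec_maxTriplets; infer_instance

-- ===== CLAIM (what is proved, stated in full; the proofs are below) =====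
def Claim_equal_maxTriplets : Prop := ∀ (nums : List Int), Dom_maxTriplets nums → Spec_maxTriplets nums (maxTriplets nums)

-- ===== LEMMAS AND PROOFS =====

-- the DP value A computes for a suffix
def opt : List Int → Int
  | a :: b :: c :: rest =>
    if a + b + c = 0 then max (max (1 + opt rest) (opt (b :: c :: rest))) (opt (c :: rest))
    else max (max (opt (b :: c :: rest)) (opt (c :: rest))) (opt rest)
  | _ => 0
termination_by l => l.length
decreasing_by all_goals (simp; try omega)

-- the greedy value B computes for a suffix
def greedy : List Int → Int
  | a :: b :: c :: rest => if a + b + c = 0 then 1 + greedy rest else greedy (b :: c :: rest)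
  | _ => 0
termination_by l => l.length
decreasing_by all_goals (simp; try omega)

theorem opt_short (l : List Int) (h : l.length < 3) : opt l = 0 := by
  match l with
  | [] => simp [opt]
  | [_] => simp [opt]
  | [_, _] => simp [opt]
  | _ :: _ :: _ :: _ => simp at h; omega

theorem greedy_short (l : List Int) (h : l.length < 3) : greedy l = 0 := by
  match l with
  | [] => simp [greedy]
  | [_] => simp [greedy]
  | [_, _] => simp [greedy]
  | _ :: _ :: _ :: _ => simp at h; omega

theorem opt_cons_le (a : Int) (l : List Int) : opt l ≤ opt (a :: l) := by
  match l with
  | [] => simp [opt]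
  | [_] => simp [opt]
  | b :: c :: rest =>
    rw [opt]
    split <;> simp

theorem opt_tail_le (l : List Int) : opt (l.drop 1) ≤ opt l := by
  match l with
  | [] => simp
  | a :: l => simpa using opt_cons_le a l

theorem opt_drop_le (k : Nat) (l : List Int) : opt (l.drop k) ≤ opt l := by
  induction k generalizing l with
  | zero => simp
  | succ k ih =>
    calc opt (l.drop (k+1)) = opt ((l.drop 1).drop k) := by rw [List.drop_drop]; ring_nf
    _ ≤ opt (l.drop 1) := ih _
    _ ≤ opt l := opt_tail_le l

theorem opt_le_one_add_drop3 (l : List Int) : opt l ≤ 1 + opt (l.drop 3) := by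
  induction hn : l.length using Nat.strong_induction_on generalizing l with
  | _ n ih =>
  match l with
  | [] => simp [opt]
  | [_] => simp [opt]
  | [_, _] => simp [opt]
  | a :: b :: c :: rest =>
    have h1 : opt (b :: c :: rest) ≤ 1 + opt (rest.drop 1) := by
      have := ih (b :: c :: rest).length (by subst hn; simp) (b :: c :: rest) rfl
      simpa using this
    have h2 : opt (c :: rest) ≤ 1 + opt (rest.drop 2) := by
      have := ih (c :: rest).length (by subst hn; simp) (c :: rest) rfl
      simpa using this
    have hd1 : opt (rest.drop 1) ≤ opt rest := opt_drop_le 1 rest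
    have hd2 : opt (rest.drop 2) ≤ opt rest := opt_drop_le 2 rest
    rw [opt]
    split <;> simp <;> omega

theorem greedy_eq_opt (l : List Int) : greedy l = opt l := by
  induction hn : l.length using Nat.strong_induction_on generalizing l with
  | _ n ih =>
  match l with
  | [] => simp [greedy, opt]
  | [_] => simp [greedy, opt]
  | [_, _] => simp [greedy, opt]
  | a :: b :: c :: rest =>
    rw [greedy, opt]
    split
    · have hr : greedy rest = opt rest := ih rest.length (by subst hn; simp; omega) rest rfl
      have h1 : opt (b :: c :: rest) ≤ 1 + opt rest := by
        have := opt_le_one_add_drop3 (b :: c :: rest)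
        have := opt_drop_le 1 rest
        simp at *; omega
      have h2 : opt (c :: rest) ≤ 1 + opt rest := by
        have := opt_le_one_add_drop3 (c :: rest)
        have := opt_drop_le 2 rest
        simp at *; omega
      omega
    · have hr : greedy (b :: c :: rest) = opt (b :: c :: rest) :=
        ih (b :: c :: rest).length (by subst hn; simp) (b :: c :: rest) rfl
      have h1 : opt (c :: rest) ≤ opt (b :: c :: rest) := opt_cons_le b _
      have h2 : opt rest ≤ opt (c :: rest) := opt_cons_le c _
      omega

theorem gAux_eq (nums : List Int) (i : Nat) (count : Int) :
    gAux nums i count = count + greedy (nums.drop i) := by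
  induction hm : nums.length - i using Nat.strong_induction_on generalizing i count with
  | _ m ih =>
  rw [gAux]
  by_cases h : i + 3 ≤ nums.length
  · have hi0 : i < nums.length := by omega
    have hi1 : i + 1 < nums.length := by omega
    have hi2 : i + 2 < nums.length := by omega
    have hd0 : nums.drop i = nums[i] :: nums.drop (i+1) := List.drop_eq_getElem_cons hi0
    have hd1 : nums.drop (i+1) = nums[i+1] :: nums.drop (i+2) := List.drop_eq_getElem_cons hi1
    have hd2 : nums.drop (i+2) = nums[i+2] :: nums.drop (i+3) := List.drop_eq_getElem_cons hi2
    have hg0 : nums.getD i 0 = nums[i] := List.getD_eq_getElem _ _ hi0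
    have hg1 : nums.getD (i+1) 0 = nums[i+1] := List.getD_eq_getElem _ _ hi1
    have hg2 : nums.getD (i+2) 0 = nums[i+2] := List.getD_eq_getElem _ _ hi2
    rw [if_pos h, hg0, hg1, hg2, hd0, hd1, hd2, greedy]
    split
    · rw [ih (nums.length - (i+3)) (by omega) (i+3) (count+1) rfl]
      ring
    · rw [ih (nums.length - (i+1)) (by omega) (i+1) count rfl, ← hd2, ← hd1]
  · rw [if_neg h]
    have hg : greedy (nums.drop i) = 0 := greedy_short _ (by simp; omega)
    omega

-- invariant for A's cache array: entries from index i up are the DP values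
def CacheInv (nums cache : List Int) (i : Nat) : Prop :=
  cache.length = nums.length + 1 ∧
  ∀ j : Nat, i ≤ j → j ≤ nums.length → cache.getD j 0 = opt (nums.drop j)

theorem stepA_inv (nums cache : List Int) (k : Nat) (hk : k + 3 ≤ nums.length)
    (h : CacheInv nums cache (k+1)) : CacheInv nums (stepA nums cache (k : Int)) k := by
  obtain ⟨hlen, hinv⟩ := h
  have hk0 : k < nums.length := by omega
  have hk1 : k + 1 < nums.length := by omega
  have hk2 : k + 2 < nums.length := by omega
  have hcast1 : (k : Int) + 1 = ((k+1 : Nat) : Int) := by push_cast; ring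
  have hcast2 : (k : Int) + 2 = ((k+2 : Nat) : Int) := by push_cast; ring
  have hcast3 : (k : Int) + 3 = ((k+3 : Nat) : Int) := by push_cast; ring
  have hn0 : PySem.List.pyGetD nums (k : Int) 0 = nums[k] := by
    rw [PySem.List.pyGetD_natCast, List.getD_eq_getElem _ _ hk0]
  have hn1 : PySem.List.pyGetD nums ((k : Int) + 1) 0 = nums[k+1] := by
    rw [hcast1, PySem.List.pyGetD_natCast, List.getD_eq_getElem _ _ hk1]
  have hn2 : PySem.List.pyGetD nums ((k : Int) + 2) 0 = nums[k+2] := by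
    rw [hcast2, PySem.List.pyGetD_natCast, List.getD_eq_getElem _ _ hk2]
  have hc1 : PySem.List.pyGetD cache ((k : Int) + 1) 0 = opt (nums.drop (k+1)) := by
    rw [hcast1, PySem.List.pyGetD_natCast, hinv (k+1) (by omega) (by omega)]
  have hc2 : PySem.List.pyGetD cache ((k : Int) + 2) 0 = opt (nums.drop (k+2)) := by
    rw [hcast2, PySem.List.pyGetD_natCast, hinv (k+2) (by omega) (by omega)]
  have hc3 : PySem.List.pyGetD cache ((k : Int) + 3) 0 = opt (nums.drop (k+3)) := by
    rw [hcast3, PySem.List.pyGetD_natCast, hinv (k+3) (by omega) (by omega)]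
  have hd0 : nums.drop k = nums[k] :: nums.drop (k+1) := List.drop_eq_getElem_cons hk0
  have hd1 : nums.drop (k+1) = nums[k+1] :: nums.drop (k+2) := List.drop_eq_getElem_cons hk1
  have hd2 : nums.drop (k+2) = nums[k+2] :: nums.drop (k+3) := List.drop_eq_getElem_cons hk2
  have hoptk : opt (nums.drop k) =
      if nums[k] + nums[k+1] + nums[k+2] = 0 then
        max (max (1 + opt (nums.drop (k+3))) (opt (nums.drop (k+1)))) (opt (nums.drop (k+2)))
      else
        max (max (opt (nums.drop (k+1)))  (opt (nums.drop (k+2)))) (opt (nums.drop (k+3))) := by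
    conv_lhs => rw [hd0, hd1, hd2]
    rw [opt, ← hd2, ← hd1]
  have hset : stepA nums cache (k : Int) = cache.set k (opt (nums.drop k)) := by
    unfold stepA
    rw [hn0, hn1, hn2, hc1, hc2, hc3, hoptk]
    split <;> simp
  rw [hset]
  constructor
  · simpa using hlen
  · intro j hij hjn
    by_cases hjk : j = k
    · subst hjk
      rw [List.getD_eq_getElem?_getD, List.getElem?_set_self (by omega)]
      rfl
    · rw [List.getD_eq_getElem?_getD, List.getElem?_set_ne (fun he => hjk he.symm),
          ← List.getD_eq_getElem?_getD]
      exact hinv j (by omega) hjn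

theorem foldA_inv (nums : List Int) (k : Nat) (cache : List Int)
    (hk : k + 3 ≤ nums.length) (h : CacheInv nums cache (k+1)) :
    CacheInv nums ((PySem.List.pyRange (k : Int) (-1) (-1)).foldl (stepA nums) cache) 0 := by
  induction k generalizing cache with
  | zero =>
    rw [PySem.List.pyRange_neg_one_cons (by omega),
        show ((0:Nat):Int) - 1 = (-1 : Int) by omega,
        PySem.List.pyRange_neg_one_eq_nil (by omega)]
    simpa using stepA_inv nums cache 0 hk h
  | succ k ih =>
    rw [PySem.List.pyRange_neg_one_cons (by omega)]
    have hstep := stepA_inv nums cache (k+1) hk h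
    have hc : ((k+1 : Nat) : Int) - 1 = (k : Int) := by omega
    rw [List.foldl_cons, hc]
    exact ih _ (by omega) hstep

theorem inv_init (nums : List Int) (m : Nat) (hm : nums.length ≤ m + 2) :
    CacheInv nums (List.replicate (nums.length + 1) 0) m := by
  constructor
  · simp
  · intro j hij hjn
    rw [List.getD_eq_getElem _ _ (by simp; omega), List.getElem_replicate,
        opt_short _ (by simp; omega)]

-- ===== VERDICT (by name: the statement is the Claim_ definition above) =====
theorem maxTriplets_spec : Claim_equal_maxTriplets := by
  intro nums _
  show maxTriplets nums = maxTriplets_alt nums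
  simp only [maxTriplets, maxTriplets_alt]
  rw [gAux_eq, List.drop_zero, greedy_eq_opt, zero_add]
  by_cases h3 : (nums.length : Int) < 3
  · rw [if_pos h3, opt_short _ (by omega)]
  · rw [if_neg h3]
    have hn3 : 3 ≤ nums.length := by omega
    have hcast : (nums.length : Int) - 3 = ((nums.length - 3 : Nat) : Int) := by omega
    have hrep : ((nums.length : Int) + 1).toNat = nums.length + 1 := by omega
    rw [hcast, hrep]
    obtain ⟨hlen, hinv⟩ := foldA_inv nums (nums.length - 3) (List.replicate (nums.length + 1) 0)
      (by omega) (inv_init nums _ (by omega))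
    set cache := (PySem.List.pyRange ((nums.length - 3 : Nat) : Int) (-1) (-1)).foldl
      (stepA nums) (List.replicate (nums.length + 1) 0) with hc
    have e0 := hinv 0 (by omega) (by omega)
    have e1 := hinv 1 (by omega) (by omega)
    have e2 := hinv 2 (by omega) (by omega)
    rw [List.drop_zero] at e0
    rw [PySem.List.pyGetD_zero, PySem.List.pyGetD_ofNat' cache 1, PySem.List.pyGetD_ofNat' cache 2,
        e0, e1, e2]
    rw [max_eq_left (opt_drop_le 1 nums), max_eq_left (opt_drop_le 2 nums)]
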